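-- pv_equiv track=rewrite | github.com/rrm003/LeetCode | 0468-validate-ip-address/0468-validate-ip-address.py | validateIPV4Fragment
-- ===== SOURCE A (Python) =====
-- def validateIPV4Fragment(fragment :str) -> bool:
--     if len(fragment) < 1: return False
--     if fragment[0] == "0":
--         if len(fragment) == 1: return True
--         return False
--
--     valid = ["1", "2", "3", "4", "5", "6", "7", "8", "9", "0"]
--     for x in fragment:
--         if x not in valid: return False
--
--     return int(fragment) > 0 and int(fragment) <= 255
-- ===== SOURCE B (Python) =====
-- _CANON = frozenset(str(v) for v in range(256))
--
--
-- def validateIPV4Fragment(fragment: str) -> bool: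
--     return fragment in _CANON
-- ===== Notes on version B (the rewrite author's own statement) =====
-- stated objective: simpler
-- what changed: B replaces the leading-zero special case, the per-character digit loop and the int-range check by one membership test in a precomputed set of the 256 canonical octet strings.
import Mathlib
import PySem

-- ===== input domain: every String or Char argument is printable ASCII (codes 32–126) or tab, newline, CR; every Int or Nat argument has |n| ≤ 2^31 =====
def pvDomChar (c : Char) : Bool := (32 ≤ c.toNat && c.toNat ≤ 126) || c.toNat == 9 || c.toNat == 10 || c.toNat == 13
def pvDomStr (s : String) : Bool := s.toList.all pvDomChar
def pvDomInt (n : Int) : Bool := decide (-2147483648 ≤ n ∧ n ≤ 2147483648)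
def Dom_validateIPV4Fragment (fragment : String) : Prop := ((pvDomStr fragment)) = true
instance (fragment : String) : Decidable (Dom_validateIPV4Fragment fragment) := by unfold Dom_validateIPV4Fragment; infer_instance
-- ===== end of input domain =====

-- B replaces A's leading-zero guard, per-character digit loop and int-range check by a single
-- membership test in a precomputed set of the 256 canonical octet strings ("0".."255").


-- ===== PORT A =====
-- the literal list `valid` of A
def pvValid : List Char := ['1', '2', '3', '4', '5', '6', '7', '8', '9', '0']

-- hand port of Python's `int(fragment)`: exact at its only call site, which A reaches only after
-- the loop has verified that fragment is a nonempty string of ASCII digits (base-10 digit fold)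
def pvIntOfDigits (cs : List Char) : Int := cs.foldl (fun a c => 10 * a + ((c.toNat : Int) - 48)) 0

-- the `for x in fragment` loop followed by the final return
def pvLoopA (all : List Char) : List Char → Bool
  | [] => decide (0 < pvIntOfDigits all) && decide (pvIntOfDigits all ≤ 255)
  | x :: rest => if pvValid.contains x = false then false else pvLoopA all rest

def validateIPV4Fragment (fragment : String) : Bool :=
  let cs := fragment.toList
  if cs.length < 1 then false
  else if PySem.List.pyGet? cs 0 == some '0' then decide (cs.length = 1)
  else pvLoopA cs cs

-- ===== PORT B =====
-- _CANON = frozenset(str(v) for v in range(256))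
def pvCanon : PySem.Set String :=
  PySem.Set.ofList ((List.range 256).map (fun n => PySem.Int.toStr (Int.ofNat n)))

def validateIPV4Fragment_alt (fragment : String) : Bool :=
  PySem.Set.contains pvCanon fragment

-- ===== PRECONDITION & SPEC =====
def Spec_validateIPV4Fragment (fragment : String) (out : Bool) : Prop := out = validateIPV4Fragment_alt fragment
instance (fragment : String) (out : Bool) : Decidable (Spec_validateIPV4Fragment fragment out) := by unfold Spec_validateIPV4Fragment; infer_instance

-- ===== CLAIM (what is proved, stated in full; the proofs are below) =====
def Claim_equal_validateIPV4Fragment : Prop := ∀ (fragment : String), Dom_validateIPV4Fragment fragment → Spec_validateIPV4Fragment fragment (validateIPV4Fragment fragment)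

-- ===== LEMMAS AND PROOFS =====

-- a digit char, for the finite enumerations below
def pvDch (i : Fin 10) : Char := Char.ofNat (48 + i.val)

lemma pvValid_dch (c : Char) (h : c ∈ pvValid) : ∃ i : Fin 10, c = pvDch i := by
  fin_cases h
  · exact ⟨1, rfl⟩
  · exact ⟨2, rfl⟩
  · exact ⟨3, rfl⟩
  · exact ⟨4, rfl⟩
  · exact ⟨5, rfl⟩
  · exact ⟨6, rfl⟩
  · exact ⟨7, rfl⟩
  · exact ⟨8, rfl⟩
  · exact ⟨9, rfl⟩
  · exact ⟨0, rfl⟩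

lemma pvLoopA_eq (all cs : List Char) :
    pvLoopA all cs =
      (cs.all (fun c => pvValid.contains c) &&
        (decide (0 < pvIntOfDigits all) && decide (pvIntOfDigits all ≤ 255))) := by
  induction cs with
  | nil => simp [pvLoopA]
  | cons x rest ih =>
    by_cases hx : x ∈ pvValid
    · simp [pvLoopA, hx, ih]
    · simp [pvLoopA, hx]

lemma pv_alt_iff (fragment : String) :
    validateIPV4Fragment_alt fragment = true ↔
      ∃ n : Fin 256, fragment = PySem.Int.toStr (Int.ofNat n.val) := by
  rw [validateIPV4Fragment_alt, PySem.Set.contains_iff, pvCanon, PySem.Set.mem_ofList]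
  simp only [List.mem_map, List.mem_range]
  constructor
  · rintro ⟨n, hn, rfl⟩; exact ⟨⟨n, hn⟩, rfl⟩
  · rintro ⟨n, rfl⟩; exact ⟨n.val, n.isLt, rfl⟩

-- roundtrips for the ≤ 3-digit no-leading-zero strings, evaluated over all digit combinations
set_option maxRecDepth 40000 in
lemma pv_rt1 : ∀ a : Fin 10, a ≠ 0 →
    (PySem.Int.toStr (pvIntOfDigits [pvDch a])).toList = [pvDch a] := by decide
set_option maxRecDepth 40000 in
lemma pv_rt2 : ∀ a b : Fin 10, a ≠ 0 →
    (PySem.Int.toStr (pvIntOfDigits [pvDch a, pvDch b])).toList = [pvDch a, pvDch b] := by decide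
set_option maxRecDepth 40000 in
lemma pv_rt3 : ∀ a b c : Fin 10, a ≠ 0 → pvIntOfDigits [pvDch a, pvDch b, pvDch c] ≤ 255 →
    (PySem.Int.toStr (pvIntOfDigits [pvDch a, pvDch b, pvDch c])).toList
      = [pvDch a, pvDch b, pvDch c] := by decide

lemma pv_digit_bounds (c : Char) (h : c ∈ pvValid) : 48 ≤ c.toNat ∧ c.toNat ≤ 57 := by
  fin_cases h <;> decide

-- the fold only grows: 10^len * acc ≤ fold over digit chars
lemma pv_fold_lower (cs : List Char) (acc : Int) (h : ∀ c ∈ cs, c ∈ pvValid) (hacc : 0 ≤ acc) :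
    (10 : Int) ^ cs.length * acc ≤ cs.foldl (fun a c => 10 * a + ((c.toNat : Int) - 48)) acc := by
  induction cs generalizing acc with
  | nil => simpa using le_refl acc
  | cons x rest ih =>
    have hx := pv_digit_bounds x (h x (List.mem_cons_self))
    have hd : (0 : Int) ≤ (x.toNat : Int) - 48 := by
      have := hx.1; omega
    have hrec := ih (10 * acc + ((x.toNat : Int) - 48))
      (fun c hc => h c (List.mem_cons_of_mem x hc)) (by positivity)
    calc (10 : Int) ^ (x :: rest).length * acc
        = (10 : Int) ^ rest.length * (10 * acc) := by
          rw [List.length_cons, pow_succ]; ring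
      _ ≤ (10 : Int) ^ rest.length * (10 * acc + ((x.toNat : Int) - 48)) := by
          have hp : (0:Int) ≤ (10 : Int) ^ rest.length := by positivity
          nlinarith
      _ ≤ _ := hrec

lemma pv_strings_eq (s t : String) (h : s.toList = t.toList) : s = t := by
  have h2 : String.ofList s.toList = String.ofList t.toList := by rw [h]
  rwa [String.ofList_toList, String.ofList_toList] at h2

set_option maxRecDepth 40000 in
lemma pv_A_canon : ∀ n : Fin 256,
    validateIPV4Fragment (PySem.Int.toStr (Int.ofNat n.val)) = true := by decide

-- the body of A accepts only a canonical octet string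
lemma pv_A_to_canon (cs : List Char)
    (hA : (if cs.length < 1 then false
           else if PySem.List.pyGet? cs 0 == some '0' then decide (cs.length = 1)
           else pvLoopA cs cs) = true) :
    ∃ n : Fin 256, cs = (PySem.Int.toStr (Int.ofNat n.val)).toList := by
  match cs, hA with
  | c :: rest, hA =>
  rw [if_neg (by simp)] at hA
  by_cases hz : c = '0'
  · subst hz
    rw [if_pos (by simp [PySem.List.pyGet?_zero_cons]), decide_eq_true_iff] at hA
    have hrest : rest = [] := by
      simpa using hA
    subst hrest
    exact ⟨0, by decide⟩
  · rw [if_neg (by simp [PySem.List.pyGet?_zero_cons, hz]), pvLoopA_eq,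
      Bool.and_eq_true, Bool.and_eq_true, decide_eq_true_iff, decide_eq_true_iff] at hA
    obtain ⟨hall, hpos, hle⟩ := hA
    rw [List.all_eq_true] at hall
    have hall' : ∀ x ∈ c :: rest, x ∈ pvValid := fun x hx => by
      have := hall x hx; rwa [List.contains_iff_mem] at this
    obtain ⟨i, rfl⟩ := pvValid_dch c (hall' c List.mem_cons_self)
    have hi : i ≠ 0 := by
      intro h; apply hz; rw [h]; rfl
    have hd1 : (1 : Int) ≤ ((pvDch i).toNat : Int) - 48 := by
      have h2 := pv_digit_bounds (pvDch i) (hall' (pvDch i) List.mem_cons_self)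
      have h3 : (pvDch i).toNat ≠ 48 := by
        intro h; apply hz
        have h4 : pvDch i = Char.ofNat 48 := by rw [← h, Char.ofNat_toNat]
        exact h4
      omega
    have hrestmem : ∀ x ∈ rest, x ∈ pvValid :=
      fun x hx => hall' x (List.mem_cons_of_mem _ hx)
    have hlow := pv_fold_lower rest (((pvDch i).toNat : Int) - 48) hrestmem (by omega)
    have hfold : pvIntOfDigits (pvDch i :: rest)
        = rest.foldl (fun a x => 10 * a + ((x.toNat : Int) - 48))
            (((pvDch i).toNat : Int) - 48) := by
      simp [pvIntOfDigits, List.foldl_cons]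
    have hlen : rest.length ≤ 2 := by
      by_contra hlen
      push_neg at hlen
      have h3 : (10 : Int) ^ (3 : ℕ) ≤ (10 : Int) ^ rest.length :=
        pow_le_pow_right₀ (by norm_num) (by omega)
      have hbig : (1000 : Int) ≤ pvIntOfDigits (pvDch i :: rest) := by
        rw [hfold]
        calc (1000 : Int) = 10 ^ (3 : ℕ) * 1 := by norm_num
          _ ≤ (10 : Int) ^ rest.length * (((pvDch i).toNat : Int) - 48) :=
              mul_le_mul h3 hd1 (by norm_num) (by positivity)
          _ ≤ _ := hlow
      omega
    have hv256 : (pvIntOfDigits (pvDch i :: rest)).toNat < 256 := by omega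
    refine ⟨⟨(pvIntOfDigits (pvDch i :: rest)).toNat, hv256⟩, ?_⟩
    have hcast : Int.ofNat (pvIntOfDigits (pvDch i :: rest)).toNat
        = pvIntOfDigits (pvDch i :: rest) := by
      rw [Int.ofNat_eq_natCast, Int.toNat_of_nonneg (le_of_lt hpos)]
    rw [hcast]
    match rest, hlen, hrestmem, hle with
    | [], _, _, _ => exact (pv_rt1 i hi).symm
    | [b], _, hrestmem, _ =>
      obtain ⟨j, rfl⟩ := pvValid_dch b (hrestmem b List.mem_cons_self)
      exact (pv_rt2 i j hi).symm
    | [b, c2], _, hrestmem, hle =>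
      obtain ⟨j, rfl⟩ := pvValid_dch b (hrestmem b List.mem_cons_self)
      obtain ⟨k, rfl⟩ := pvValid_dch c2
        (hrestmem c2 (List.mem_cons_of_mem _ List.mem_cons_self))
      exact (pv_rt3 i j k hi hle).symm

-- A = B
lemma pv_main (fragment : String) :
    validateIPV4Fragment fragment = validateIPV4Fragment_alt fragment := by
  by_cases hB : validateIPV4Fragment_alt fragment = true
  · rw [hB]
    obtain ⟨n, rfl⟩ := (pv_alt_iff fragment).1 hB
    exact pv_A_canon n
  · rw [Bool.not_eq_true] at hB
    rw [hB, Bool.eq_false_iff]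
    intro hA
    apply absurd hB
    rw [Bool.not_eq_false, pv_alt_iff]
    rw [validateIPV4Fragment] at hA
    obtain ⟨n, hn⟩ := pv_A_to_canon fragment.toList hA
    exact ⟨n, pv_strings_eq _ _ hn⟩

-- ===== VERDICT (by name: the statement is the Claim_ definition above) =====
theorem validateIPV4Fragment_spec : Claim_equal_validateIPV4Fragment := by
  intro fragment _
  unfold Spec_validateIPV4Fragment
  exact pv_main fragment
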